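-- pv_equiv track=rewrite | github.com/gridvisi/Python_workspace | Zero 2 Hero Class/if_condition or control_flow/6 kyu Simple Fun 305 Typist.py | typist
-- ===== SOURCE A (Python) =====
-- def typist(s):
--     cunt,flag = 0,True
--     for i in s:
--         if i.islower() and flag:
--             cunt += 1
--
--         elif i.islower() and not flag:
--             cunt += 2
--             flag = True
--
--         elif i.isupper() and flag:
--             cunt += 2
--             flag = False
--
--         elif i.isupper() and not flag:
--             cunt += 1
--             #flag = False
--     return cunt
-- ===== SOURCE B (Python) =====
-- def typist(s):
--     # encode the cased characters as a case-text prefixed with lowercase mode;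
--     # keystrokes = one per cased char + one caps-lock toggle per case boundary
--     t = 'l' + ''.join('u' if c.isupper() else 'l' for c in s if c.islower() or c.isupper())
--     return len(t) - 1 + t.count('lu') + t.count('ul')
-- ===== Notes on version B (the rewrite author's own statement) =====
-- stated objective: alternative
-- what changed: B replaces A's four-branch caps-lock state machine by a stateless encoding: it writes the cased characters as a case-text of upper/lower marks prefixed by the initial lowercase mark and returns the text length minus one plus the substring counts of the two mark-change digrams, each case boundary being one caps-lock toggle.
import Mathlib
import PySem

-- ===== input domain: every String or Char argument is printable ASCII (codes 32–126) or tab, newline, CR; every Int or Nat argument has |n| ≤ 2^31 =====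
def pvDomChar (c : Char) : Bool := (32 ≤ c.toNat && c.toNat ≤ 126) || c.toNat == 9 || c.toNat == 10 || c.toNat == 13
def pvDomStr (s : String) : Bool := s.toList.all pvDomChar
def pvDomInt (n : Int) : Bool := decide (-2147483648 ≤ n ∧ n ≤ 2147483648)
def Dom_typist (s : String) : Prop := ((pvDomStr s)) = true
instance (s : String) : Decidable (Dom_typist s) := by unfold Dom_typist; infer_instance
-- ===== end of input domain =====

-- B replaces A's four-branch caps-lock state machine by a stateless text encoding:
-- it writes the cased characters as a case-text of upper/lower marks prefixed by the
-- initial lowercase mark, then keystrokes = cased count + substring counts of the two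
-- mark-change digrams, one caps-lock toggle per case boundary (alternative decomposition).


-- ===== PORT A =====
def typistGo : List Char → Int → Bool → Int
  | [], cunt, _ => cunt
  | i :: rest, cunt, flag =>
    if PySem.Chars.islower i && flag then typistGo rest (cunt + 1) flag
    else if PySem.Chars.islower i && !flag then typistGo rest (cunt + 2) true
    else if PySem.Chars.isupper i && flag then typistGo rest (cunt + 2) false
    else if PySem.Chars.isupper i && !flag then typistGo rest (cunt + 1) flag
    else typistGo rest cunt flag

def typist (s : String) : Int := typistGo s.toList 0 true

-- ===== PORT B =====
-- the case-text: 'u'/'l' for each cased character of s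
def typistCaseText (l : List Char) : List Char :=
  l.filterMap (fun c =>
    if PySem.Chars.islower c || PySem.Chars.isupper c then
      some (if PySem.Chars.isupper c then 'u' else 'l')
    else none)

def typist_alt (s : String) : Int :=
  ('l' :: typistCaseText s.toList).length - 1
    + (PySem.Chars.count ('l' :: typistCaseText s.toList) ['l', 'u'] : Int)
    + (PySem.Chars.count ('l' :: typistCaseText s.toList) ['u', 'l'] : Int)

-- ===== PRECONDITION & SPEC =====
def Spec_typist (s : String) (out : Int) : Prop := out = typist_alt s
instance (s : String) (out : Int) : Decidable (Spec_typist s out) := by unfold Spec_typist; infer_instance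

-- ===== CLAIM (what is proved, stated in full; the proofs are below) =====
def Claim_equal_typist : Prop := ∀ (s : String), Dom_typist s → Spec_typist s (typist s)

-- ===== LEMMAS AND PROOFS =====

-- number of adjacent occurrences of the pair (a, b)
def pairsAB (a b : Char) : List Char → Nat
  | x :: y :: t => (if x = a ∧ y = b then 1 else 0) + pairsAB a b (y :: t)
  | _ => 0

-- number of adjacent mismatches
def mism : List Char → Nat
  | x :: y :: t => (if x ≠ y then 1 else 0) + mism (y :: t)
  | _ => 0

theorem not_upper_of_lower (c : Char) (h : PySem.Chars.islower c = true) :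
    PySem.Chars.isupper c = false := by
  have ha : 'a'.val.toNat = 97 := rfl
  have hz : 'z'.val.toNat = 122 := rfl
  have hA : 'A'.val.toNat = 65 := rfl
  have hZ : 'Z'.val.toNat = 90 := rfl
  simp only [PySem.Chars.islower, Bool.and_eq_true, decide_eq_true_eq, Char.le_def,
    UInt32.le_iff_toNat_le, ha, hz] at h
  simp only [PySem.Chars.isupper, Bool.and_eq_false_iff, decide_eq_false_iff_not, Char.le_def,
    UInt32.le_iff_toNat_le, not_le, hA, hZ]
  omega

theorem pairsAB_cons_of_ne (a b y : Char) (r : List Char) (hy : y ≠ a) :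
    pairsAB a b (y :: r) = pairsAB a b r := by
  cases r with
  | nil => simp [pairsAB]
  | cons z r' => simp [pairsAB, hy]

theorem count_go_nil (sub : List Char) (fuel acc : Nat) :
    PySem.Chars.count.go sub fuel [] acc = acc := by
  cases fuel <;> simp [PySem.Chars.count.go]

theorem count_go_eq (a b : Char) (hab : a ≠ b) :
    ∀ (fuel : Nat) (l : List Char) (acc : Nat), l.length ≤ fuel →
      PySem.Chars.count.go [a, b] fuel l acc = acc + pairsAB a b l := by
  intro fuel
  induction fuel with
  | zero =>
    intro l acc h
    have : l = [] := List.length_eq_zero_iff.mp (Nat.le_zero.mp h)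
    subst this
    simp [count_go_nil, pairsAB]
  | succ n ih =>
    intro l acc h
    cases l with
    | nil => simp [count_go_nil, pairsAB]
    | cons x t =>
      cases t with
      | nil =>
        have hpre : [a, b].isPrefixOf [x] = false := by
          simp [List.isPrefixOf]
        simp [PySem.Chars.count.go, hpre, count_go_nil, pairsAB]
      | cons y r =>
        cases hpre : [a, b].isPrefixOf (x :: y :: r) with
        | true =>
          have hm : x = a ∧ y = b := by
            simp [List.isPrefixOf] at hpre
            exact ⟨hpre.1.symm, hpre.2.symm⟩
          have hlen : r.length ≤ n := by
            simp [List.length_cons] at h; omega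
          have hyne : y ≠ a := fun e => hab (hm.2 ▸ e.symm)
          simp only [PySem.Chars.count.go, hpre, if_true]
          rw [show List.drop [a, b].length (x :: y :: r) = r by simp]
          rw [ih r (acc + 1) hlen]
          have h1 : pairsAB a b (x :: y :: r) = 1 + pairsAB a b (y :: r) := by
            simp [pairsAB, hm.1, hm.2]
          rw [h1, pairsAB_cons_of_ne a b y r hyne]
          omega
        | false =>
          have hm : ¬ (x = a ∧ y = b) := by
            intro ⟨hx, hy⟩
            simp [List.isPrefixOf, hx, hy] at hpre
          have hlen : (y :: r).length ≤ n := by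
            simp [List.length_cons] at h ⊢; omega
          simp only [PySem.Chars.count.go, hpre]
          rw [ih (y :: r) acc hlen]
          simp [pairsAB, hm]

theorem count_eq_pairsAB (a b : Char) (hab : a ≠ b) (l : List Char) :
    PySem.Chars.count l [a, b] = pairsAB a b l := by
  have : ([a, b] : List Char).isEmpty = false := rfl
  simp only [PySem.Chars.count, this, Bool.false_eq_true, if_false]
  simpa using count_go_eq a b hab l.length l 0 le_rfl

theorem caseText_mem (l : List Char) :
    ∀ c ∈ typistCaseText l, c = 'l' ∨ c = 'u' := by
  intro c hc
  simp only [typistCaseText, List.mem_filterMap] at hc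
  obtain ⟨x, _, hx⟩ := hc
  split_ifs at hx with h1 h2
  · right; exact (Option.some_inj.mp hx).symm
  · left; exact (Option.some_inj.mp hx).symm

theorem pairs_lu_ul_eq_mism (t : List Char) (h : ∀ c ∈ t, c = 'l' ∨ c = 'u') :
    pairsAB 'l' 'u' t + pairsAB 'u' 'l' t = mism t := by
  induction t with
  | nil => simp [pairsAB, mism]
  | cons x t ih =>
    cases t with
    | nil => simp [pairsAB, mism]
    | cons y r =>
      have hx := h x (by simp)
      have hy := h y (by simp)
      have ih' := ih (fun c hc => h c (List.mem_cons_of_mem _ hc))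
      simp only [pairsAB, mism]
      rcases hx with hx | hx <;> rcases hy with hy | hy <;>
        subst hx <;> subst hy <;> simp at ih' ⊢ <;> omega

theorem caseText_cons_lower (i : Char) (r : List Char) (hl : PySem.Chars.islower i = true) :
    typistCaseText (i :: r) = 'l' :: typistCaseText r := by
  simp [typistCaseText, hl, not_upper_of_lower i hl]

theorem caseText_cons_upper (i : Char) (r : List Char) (hu : PySem.Chars.isupper i = true) :
    typistCaseText (i :: r) = 'u' :: typistCaseText r := by
  simp [typistCaseText, hu]

theorem caseText_cons_other (i : Char) (r : List Char) (hl : PySem.Chars.islower i = false)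
    (hu : PySem.Chars.isupper i = false) : typistCaseText (i :: r) = typistCaseText r := by
  simp [typistCaseText, hl, hu]

-- A's state machine equals: cased count + adjacent mismatches of the mode-prefixed case-text
theorem typistGo_eq (l : List Char) (c : Int) (flag : Bool) :
    typistGo l c flag
      = c + ((typistCaseText l).length : Int)
          + (mism ((if flag then 'l' else 'u') :: typistCaseText l) : Int) := by
  induction l generalizing c flag with
  | nil => cases flag <;> simp [typistGo, typistCaseText, mism]
  | cons i r ih =>
    by_cases hl : PySem.Chars.islower i = true
    · have hu := not_upper_of_lower i hl
      rw [caseText_cons_lower i r hl] at *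
      cases flag with
      | true =>
        simp only [typistGo, hl, hu, if_true, Bool.and_true, Bool.and_false, Bool.not_true]
        rw [ih (c + 1) true]
        simp [mism]; ring
      | false =>
        simp only [typistGo, hl, hu, Bool.and_false, Bool.not_false, Bool.and_true]
        rw [ih (c + 2) true]
        simp [mism]; ring
    · simp only [Bool.not_eq_true] at hl
      by_cases hu : PySem.Chars.isupper i = true
      · rw [caseText_cons_upper i r hu] at *
        cases flag with
        | true =>
          simp only [typistGo, hl, hu, Bool.and_true, Bool.not_true,
            Bool.and_false]
          rw [ih (c + 2) false]
          simp [mism]; ring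
        | false =>
          simp only [typistGo, hl, hu, Bool.and_false, Bool.not_false,
            Bool.and_true]
          rw [ih (c + 1) false]
          simp [mism]; ring
      · simp only [Bool.not_eq_true] at hu
        rw [caseText_cons_other i r hl hu] at *
        cases flag <;> simp only [typistGo, hl, hu, Bool.false_and] <;> exact ih c _

-- ===== VERDICT (by name: the statement is the Claim_ definition above) =====
theorem typist_spec : Claim_equal_typist := by
  intro s _
  show typist s = typist_alt s
  have hmem : ∀ c ∈ 'l' :: typistCaseText s.toList, c = 'l' ∨ c = 'u' := by
    intro c hc
    rcases List.mem_cons.mp hc with h | h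
    · left; exact h
    · exact caseText_mem s.toList c h
  have hlu : ('l' : Char) ≠ 'u' := by decide
  have hul : ('u' : Char) ≠ 'l' := by decide
  rw [typist, typist_alt, typistGo_eq,
    count_eq_pairsAB 'l' 'u' hlu, count_eq_pairsAB 'u' 'l' hul]
  have := pairs_lu_ul_eq_mism ('l' :: typistCaseText s.toList) hmem
  simp only [if_true, List.length_cons]
  push_cast
  omega
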